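-- pv_equiv track=rewrite | github.com/AlexanderHBerger/3D_segmentation | architectures.py | calculate_n_stages
-- ===== SOURCE A (Python) =====
-- from typing import Optional, Union, List, Tuple, Type
--
-- def calculate_n_stages(patch_size: Tuple[int, ...], min_feature_map_size: int = 4) -> int:
--     """
--     Calculate number of network stages based on patch size.
--
--     Following nnUNet pattern: downsample by 2 until feature maps reach minimum size.
--
--     Args:
--         patch_size: Input patch size (D, H, W) for 3D or (H, W) for 2D
--         min_feature_map_size: Minimum feature map size at bottleneck (default: 4)
--
--     Returns:
--         Number of stages (clamped between 3 and 7)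
--     """
--     # Calculate number of pooling operations per axis
--     num_pool_per_axis = []
--     for axis_size in patch_size:
--         num_pool = 0
--         current_size = axis_size
--         while current_size >= 2 * min_feature_map_size:
--             current_size = current_size / 2
--             num_pool += 1
--         num_pool_per_axis.append(num_pool)
--
--     # Number of stages = 1 (initial) + number of pooling stages
--     # Use the minimum across all axes to ensure all feature maps meet the constraint
--     n_stages = min(num_pool_per_axis) + 1
--     n_stages = max(3, min(7, n_stages))  # Clamp between 3 and 7 (nnUNet limits)
--
--     return n_stages
-- ===== SOURCE B (Python) =====
-- def calculate_n_stages(patch_size, min_feature_map_size: int = 4) -> int: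
--     # Closed form per axis: the number of times an axis can be halved before
--     # dropping below min_feature_map_size is the bit length of axis_size // min_feature_map_size, minus 1.
--     num_pool_per_axis = []
--     for axis_size in patch_size:
--         q = axis_size // min_feature_map_size
--         num_pool_per_axis.append(q.bit_length() - 1 if q > 0 else 0)
--     n_stages = min(num_pool_per_axis) + 1
--     return max(3, min(7, n_stages))
-- ===== Notes on version B (the rewrite author's own statement) =====
-- stated objective: idiomatic
-- what changed: Replaces the per-axis repeated-halving while loop over float sizes by a closed-form bit-length computation: pool count = (axis_size // min_feature_map_size).bit_length() - 1 when positive.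
-- outside the precondition, e.g. on calculate_n_stages((-5,), 0): A returns 3, B raises ZeroDivisionError; on calculate_n_stages((-2147483648,), -1): A returns 3, B returns 7
import Mathlib
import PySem

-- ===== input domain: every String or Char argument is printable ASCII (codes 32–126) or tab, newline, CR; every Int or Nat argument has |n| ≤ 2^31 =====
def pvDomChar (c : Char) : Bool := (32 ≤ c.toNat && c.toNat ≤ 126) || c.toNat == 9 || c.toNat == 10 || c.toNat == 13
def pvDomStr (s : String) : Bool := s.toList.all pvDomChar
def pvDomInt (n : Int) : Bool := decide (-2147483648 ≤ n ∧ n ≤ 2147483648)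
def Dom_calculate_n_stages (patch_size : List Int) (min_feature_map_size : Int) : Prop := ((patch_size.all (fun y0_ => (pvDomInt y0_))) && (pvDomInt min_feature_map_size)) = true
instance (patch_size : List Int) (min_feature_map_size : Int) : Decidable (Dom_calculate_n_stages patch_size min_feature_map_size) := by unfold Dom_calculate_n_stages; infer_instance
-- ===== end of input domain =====

-- ===== PORT A =====
-- B replaces A's per-axis halving while-loop by a closed-form bit-length computation (idiomatic).
-- Python's '/' here is float true division; on the admitted domain (|axis| <= 2^31, m >= 1,
-- at most 31 halvings) every intermediate float value is an exact dyadic rational, so Rat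
-- models the float loop exactly. fuel = 64 only makes the loop total; within Pre_ it never runs out.
def pyHalveLoopA (fuel : Nat) (m : Int) (cur : Rat) (np : Int) : Int :=
  match fuel with
  | 0 => np
  | f+1 => if ((2*m : Int) : Rat) ≤ cur then pyHalveLoopA f m (cur/2) (np+1) else np

def calculate_n_stages (patch_size : List Int) (min_feature_map_size : Int) : Int :=
  let num_pool_per_axis := patch_size.map (fun a => pyHalveLoopA 64 min_feature_map_size ((a : Int) : Rat) 0)
  match PySem.List.min? num_pool_per_axis (fun x => x) with
  | none => 0  -- min([]) raises ValueError; excluded by Pre_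
  | some mn => max 3 (min 7 (mn + 1))

-- ===== PORT B =====
def altPool (m a : Int) : Int :=
  let q := PySem.Int.floordiv a m
  if 0 < q then (PySem.Int.bitLength q : Int) - 1 else 0

def calculate_n_stages_alt (patch_size : List Int) (min_feature_map_size : Int) : Int :=
  let num_pool_per_axis := patch_size.map (fun a => altPool min_feature_map_size a)
  match PySem.List.min? num_pool_per_axis (fun x => x) with
  | none => 0  -- min([]) raises ValueError; excluded by Pre_
  | some mn => max 3 (min 7 (mn + 1))

-- ===== PRECONDITION & SPEC =====
-- Pre_ excludes the empty patch_size (min([]) raises ValueError) and min_feature_map_size <= 0,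
-- where A's float halving loop diverges for any axis not already below 2*m and A only returns by
-- accident when every axis is already below that bound (B raises ZeroDivisionError at m = 0 and
-- returns a different, meaningful count for negative m).
def Pre_calculate_n_stages (patch_size : List Int) (min_feature_map_size : Int) : Prop :=
  patch_size ≠ [] ∧ 1 ≤ min_feature_map_size
instance (patch_size : List Int) (min_feature_map_size : Int) : Decidable (Pre_calculate_n_stages patch_size min_feature_map_size) := by unfold Pre_calculate_n_stages; infer_instance

def pvWitness_calculate_n_stages : List Int × Int := ([64, 48], 4)

def Spec_calculate_n_stages (patch_size : List Int) (min_feature_map_size : Int) (out : Int) : Prop := out = calculate_n_stages_alt patch_size min_feature_map_size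
instance (patch_size : List Int) (min_feature_map_size : Int) (out : Int) : Decidable (Spec_calculate_n_stages patch_size min_feature_map_size out) := by unfold Spec_calculate_n_stages; infer_instance

-- ===== CLAIM (what is proved, stated in full; the proofs are below) =====
def Claim_equal_calculate_n_stages : Prop := ∀ (patch_size : List Int) (min_feature_map_size : Int), Dom_calculate_n_stages patch_size min_feature_map_size → Pre_calculate_n_stages patch_size min_feature_map_size → Spec_calculate_n_stages patch_size min_feature_map_size (calculate_n_stages patch_size min_feature_map_size)

-- ===== LEMMAS AND PROOFS =====

-- Integer shadow of A's loop: after j halvings the float value is a / 2^j, and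
-- a / 2^j >= 2m  <=>  2^(j+1) <= a // m.
def gLoop (fuel : Nat) (a m : Int) (j : Nat) (np : Int) : Int :=
  match fuel with
  | 0 => np
  | f+1 => if 2^(j+1) ≤ PySem.Int.floordiv a m then gLoop f a m (j+1) (np+1) else np

theorem cond_iff (a m : Int) (j : Nat) (hm : 0 < m) :
    (((2*m : Int) : Rat) ≤ (a : Rat)/2^j) ↔ ((2:Int)^(j+1) ≤ PySem.Int.floordiv a m) := by
  rw [PySem.Int.le_floordiv_iff_mul_le hm,
      le_div_iff₀ (by positivity : (0:Rat) < (2:Rat)^j),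
      show ((2:Int)^(j+1)*m) = 2*m*2^j by ring]
  constructor <;> intro h <;> exact_mod_cast h

theorem bridge (fuel : Nat) (a m : Int) (hm : 0 < m) :
    ∀ (j : Nat) (np : Int), pyHalveLoopA fuel m ((a : Rat)/2^j) np = gLoop fuel a m j np := by
  induction fuel with
  | zero => intro j np; rfl
  | succ f ih =>
    intro j np
    simp only [pyHalveLoopA, gLoop]
    rw [if_congr (cond_iff a m j hm) rfl rfl]
    by_cases h : (2:Int)^(j+1) ≤ PySem.Int.floordiv a m
    · rw [if_pos h, if_pos h, div_div, ← pow_succ]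
      exact ih (j+1) (np+1)
    · rw [if_neg h, if_neg h]

theorem two_pow_le_iff_lt_bitLength (q : Int) (hq : 0 < q) (k : Nat) :
    ((2:Int)^k ≤ q) ↔ k < PySem.Int.bitLength q := by
  have h1 : q.natAbs < 2 ^ PySem.Int.bitLength q := PySem.Int.lt_two_pow_bitLength q
  have h2 : 2 ^ (PySem.Int.bitLength q - 1) ≤ q.natAbs :=
    PySem.Int.two_pow_bitLength_le q (by omega)
  have hcast : ((2:Int)^k ≤ q) ↔ 2^k ≤ q.natAbs := by
    rw [show q = (q.natAbs : Int) by omega]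
    exact_mod_cast Iff.rfl
  rw [hcast]
  constructor
  · intro h
    exact (Nat.pow_lt_pow_iff_right (by omega)).mp (lt_of_le_of_lt h h1)
  · intro h
    have hk : k ≤ PySem.Int.bitLength q - 1 := by omega
    exact le_trans (Nat.pow_le_pow_right (by omega) hk) h2

theorem bitLength_ge_two (a m : Int) (hq : 2 ≤ PySem.Int.floordiv a m) :
    2 ≤ PySem.Int.bitLength (PySem.Int.floordiv a m) := by
  by_contra h
  push_neg at h
  have h1 : (PySem.Int.floordiv a m).natAbs < 2 ^ PySem.Int.bitLength (PySem.Int.floordiv a m) :=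
    PySem.Int.lt_two_pow_bitLength _
  have h2 : 2 ^ PySem.Int.bitLength (PySem.Int.floordiv a m) ≤ 2 := by
    calc 2 ^ PySem.Int.bitLength (PySem.Int.floordiv a m) ≤ 2^1 :=
          Nat.pow_le_pow_right (by omega) (by omega)
      _ = 2 := by norm_num
  omega

theorem gLoop_run (a m : Int) (_hm : 0 < m) (L : Nat)
    (hL : L = PySem.Int.bitLength (PySem.Int.floordiv a m) - 1)
    (hq : 2 ≤ PySem.Int.floordiv a m) :
    ∀ (fuel j : Nat) (np : Int), j ≤ L → L - j < fuel →
      gLoop fuel a m j np = np + ((L : Int) - (j : Int)) := by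
  have hqpos : 0 < PySem.Int.floordiv a m := by omega
  have hbl := bitLength_ge_two a m hq
  have hcond : ∀ j : Nat, ((2:Int)^(j+1) ≤ PySem.Int.floordiv a m) ↔ j < L := by
    intro j
    rw [two_pow_le_iff_lt_bitLength _ hqpos]
    omega
  intro fuel
  induction fuel with
  | zero => intro j np hj hf; omega
  | succ f ih =>
    intro j np hj hf
    simp only [gLoop]
    by_cases h : j < L
    · rw [if_pos ((hcond j).mpr h)]
      rw [ih (j+1) (np+1) (by omega) (by omega)]
      push_cast
      omega
    · have hjL : j = L := by omega
      rw [if_neg (by rw [hcond]; omega)]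
      rw [hjL]
      simp

theorem axis_eq (a m : Int) (hm : 1 ≤ m) (ha : a ≤ 2^31) :
    pyHalveLoopA 64 m ((a : Int) : Rat) 0 = altPool m a := by
  have h0 : ((a : Int) : Rat) = (a : Rat)/2^(0:Nat) := by norm_num
  rw [h0, bridge 64 a m (by omega) 0 0]
  by_cases hq : 2 ≤ PySem.Int.floordiv a m
  · -- q ≥ 2: the loop runs bitLength q - 1 times
    have hqpos : 0 < PySem.Int.floordiv a m := by omega
    have ha2 : 2*m ≤ a := (PySem.Int.le_floordiv_iff_mul_le (show (0:Int) < m by omega)).mp hq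
    have ha0 : 0 ≤ a := by omega
    have hqa : PySem.Int.floordiv a m ≤ a := by
      rw [PySem.Int.floordiv_eq_ediv_of_pos (show (0:Int) < m by omega)]
      exact Int.ediv_le_self m ha0
    have hbl2 := bitLength_ge_two a m hq
    have hbl : PySem.Int.bitLength (PySem.Int.floordiv a m) ≤ 32 := by
      by_contra h
      push_neg at h
      have h2 : 2 ^ (PySem.Int.bitLength (PySem.Int.floordiv a m) - 1) ≤ (PySem.Int.floordiv a m).natAbs :=
        PySem.Int.two_pow_bitLength_le _ (by omega)
      have h3 : (2:Nat) ^ 32 ≤ 2 ^ (PySem.Int.bitLength (PySem.Int.floordiv a m) - 1) :=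
        Nat.pow_le_pow_right (by omega) (by omega)
      have h4 : (PySem.Int.floordiv a m).natAbs ≤ 2^31 := by omega
      omega
    rw [gLoop_run a m (by omega) (PySem.Int.bitLength (PySem.Int.floordiv a m) - 1) rfl hq
      64 0 0 (by omega) (by omega)]
    unfold altPool
    rw [if_pos hqpos]
    push_cast
    omega
  · -- q ≤ 1: the loop body never runs, both sides are 0
    have hcond : ¬ ((2:Int)^(0+1) ≤ PySem.Int.floordiv a m) := by
      norm_num
      omega
    simp only [gLoop]
    rw [if_neg hcond]
    unfold altPool
    by_cases hq1 : 0 < PySem.Int.floordiv a m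
    · rw [if_pos hq1]
      have hq1' : PySem.Int.floordiv a m = 1 := by omega
      rw [hq1']
      decide
    · rw [if_neg hq1]

-- ===== VERDICT (by name: the statement is the Claim_ definition above) =====
theorem calculate_n_stages_spec : Claim_equal_calculate_n_stages := by
  intro ps m hdom hpre
  unfold Spec_calculate_n_stages calculate_n_stages calculate_n_stages_alt
  have hmap : ps.map (fun a => pyHalveLoopA 64 m ((a : Int) : Rat) 0)
      = ps.map (fun a => altPool m a) := by
    apply List.map_congr_left
    intro a hain
    unfold Dom_calculate_n_stages at hdom
    simp only [Bool.and_eq_true, List.all_eq_true] at hdom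
    have hda := hdom.1 a hain
    unfold pvDomInt at hda
    simp only [decide_eq_true_eq] at hda
    exact axis_eq a m hpre.2 hda.2
  rw [hmap]
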